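-- pv_equiv track=rewrite | github.com/hackershaker/Coding-Test | Programmers/12987.py | solution
-- ===== SOURCE A (Python) =====
-- from collections import deque
--
-- def solution(A, B):
--
--     answer = 0
--
--     A, B = deque(sorted(A)), deque(sorted(B))
--     k = 0
--     rot = 0
--     while rot <= len(A):
--         if len(A) == 0 or len(B) == 0:
--             break
--         if A[0] < B[0]:
--             answer += 1
--             A.popleft()
--             B.popleft()
--             rot = 0
--         else:
--             B.rotate(-1)
--             rot += 1
--         k += 1
--
--     return answer
-- ===== SOURCE B (Python) =====
-- def solution(A, B):
--     a = sorted(A)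
--     i = 0
--     for x in sorted(B):
--         if i < len(a) and x > a[i]:
--             i += 1
--     return i
-- ===== Notes on version B (the rewrite author's own statement) =====
-- stated objective: simpler
-- what changed: Replaces A's deque-rotation greedy (sorted deques, popleft, rotate(-1), and the k/rot counters) by a single linear pass over sorted(B) that advances one index into sorted(A) on each winning element.
-- intended difference: On inputs where the greedy must skip more than the remaining length of A consecutive non-beating B elements before the next winning pair, A's rotation cap (rot <= len(A) instead of len(B)) aborts the loop early and A returns an undercount, while B returns the true maximum number of pairs, which is the intended answer to the problem. — e.g. on solution([0], [-5, -3, 5]): A returns 0, B returns 1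
import Mathlib
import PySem

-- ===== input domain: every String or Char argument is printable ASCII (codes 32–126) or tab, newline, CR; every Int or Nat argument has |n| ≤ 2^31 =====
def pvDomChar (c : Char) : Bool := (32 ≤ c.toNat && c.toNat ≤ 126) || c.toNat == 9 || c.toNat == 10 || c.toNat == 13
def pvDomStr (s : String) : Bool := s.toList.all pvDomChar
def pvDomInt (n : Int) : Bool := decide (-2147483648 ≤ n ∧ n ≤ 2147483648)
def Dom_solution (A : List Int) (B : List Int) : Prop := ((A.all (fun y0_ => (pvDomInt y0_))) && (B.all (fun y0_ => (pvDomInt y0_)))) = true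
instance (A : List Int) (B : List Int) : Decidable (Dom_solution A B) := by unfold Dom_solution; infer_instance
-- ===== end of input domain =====

-- B replaces A's deque-rotation greedy (counters k/rot, rotate(-1), popleft) by a single pass
-- over sorted(B) matching against sorted(A) with one index; outside D_solution (A's early-abort
-- corner) the two agree, and B returns the intended maximum number of winning pairs inside it.

-- ===== PORT A =====
-- the while loop of A: a, b are the two deques (already sorted at entry), rot the rotation
-- counter (Python keeps it as a nonnegative int), ans the accumulator; Python's unused
-- counter k is dropped.  B.rotate(-1) is b' ++ [y].
def solLoop (a b : List Int) (rot : Nat) (ans : Int) : Int :=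
  if h : rot ≤ a.length then
    match a, b with
    | [], _ => ans                      -- len(A) == 0: break
    | _, [] => ans                      -- len(B) == 0: break
    | x :: a', y :: b' =>
      if x < y then solLoop a' b' 0 (ans + 1)          -- A[0] < B[0]: match, popleft both
      else solLoop (x :: a') (b' ++ [y]) (rot + 1) ans -- B.rotate(-1)
  else ans
termination_by (a.length, a.length + 1 - rot)
decreasing_by
  · exact Prod.Lex.left _ _ (by simp)
  · exact Prod.Lex.right _ (by omega)

def solution (A : List Int) (B : List Int) : Int :=
  solLoop (PySem.List.sorted A (fun x => x) false) (PySem.List.sorted B (fun x => x) false) 0 0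

-- ===== PORT B =====
-- Source B: i counts matched pairs; one pass over sorted(B), comparing with sorted(A)[i].
-- The guard i < len(a) keeps the index in range (i starts at 0 and only grows), so
-- pyGetD a i 0 is exactly Python's a[i] on every reached state.
def solution_alt (A : List Int) (B : List Int) : Int :=
  let a := PySem.List.sorted A (fun x => x) false
  (PySem.List.sorted B (fun x => x) false).foldl
    (fun (i : Int) x => if i < (a.length : Int) ∧ PySem.List.pyGetD a i 0 < x then i + 1 else i) 0

-- ===== PRECONDITION & SPEC =====
-- On inputs where, at some point of the sorted greedy, more than (remaining |A|) consecutive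
-- B-elements fail to beat the current smallest A-element while a beating element still remains,
-- A's rotation counter `rot` (capped by len(A) instead of len(B)) aborts the loop early and A
-- returns an undercount; B returns the true maximum number of pairs, which is the intended value.
-- dScan states this as a closed-form condition on the input, read through its sorted order
-- (Mathlib's insertionSort): per element x of ascending A,
-- g counts the elements of the remaining sorted(B) that do not beat x (they precede the first
-- beater); the corner is hit exactly when a beater remains (g < |f|) but the skip count g
-- exceeds the remaining length of A.
def dScan (a f : List Int) : Bool :=
  match a with
  | [] => false
  | x :: a' =>
    let g := f.countP (fun y => decide (y ≤ x))
    if g = f.length then false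
    else if a.length < g then true
    else dScan a' (f.drop (g + 1))

def D_solution (A : List Int) (B : List Int) : Prop :=
  dScan (A.insertionSort (· ≤ ·)) (B.insertionSort (· ≤ ·)) = true
instance (A : List Int) (B : List Int) : Decidable (D_solution A B) := by unfold D_solution; infer_instance

def Spec_solution (A : List Int) (B : List Int) (out : Int) : Prop := ¬ D_solution A B → out = solution_alt A B
instance (A : List Int) (B : List Int) (out : Int) : Decidable (Spec_solution A B out) := by unfold Spec_solution; infer_instance

def pvDiffWitness_solution : List Int × List Int := ([0], [-5, -3, 5])
def pvDiffWitnessOut_solution : Int × Int := (0, 1)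

-- ===== CLAIM (what is proved, stated in full; the proofs are below) =====
def Claim_unchanged_solution : Prop := ∀ (A : List Int) (B : List Int), Dom_solution A B → Spec_solution A B (solution A B)
def Claim_changed_solution : Prop := Dom_solution (pvDiffWitness_solution.1) (pvDiffWitness_solution.2) ∧ D_solution (pvDiffWitness_solution.1) (pvDiffWitness_solution.2) ∧ solution (pvDiffWitness_solution.1) (pvDiffWitness_solution.2) = pvDiffWitnessOut_solution.1 ∧ solution_alt (pvDiffWitness_solution.1) (pvDiffWitness_solution.2) = pvDiffWitnessOut_solution.2 ∧ pvDiffWitnessOut_solution.1 ≠ pvDiffWitnessOut_solution.2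
def Claim_exact_solution : Prop := ∀ (A : List Int) (B : List Int), Dom_solution A B → D_solution A B → solution A B ≠ solution_alt A B

-- ===== LEMMAS AND PROOFS =====

-- proof-side mirror of A's loop on sorted lists with the skipped (junk) elements dropped:
-- true iff the rotation cap aborts the loop while a beating element is still available
def badLoop (a b : List Int) (rot : Nat) : Bool :=
  if rot ≤ a.length then
    match a, b with
    | [], _ => false
    | _, [] => false
    | x :: a', y :: b' =>
      if x < y then badLoop a' b' 0 else badLoop (x :: a') b' (rot + 1)
  else
    match a with
    | [] => false
    | x :: _ => b.any (fun y => x < y)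

-- dScan with the in-phase skip count made explicit (dAux a f 0 = dScan a f)
def dAux (a f : List Int) (rot : Nat) : Bool :=
  match a with
  | [] => false
  | x :: a' =>
    let g := f.countP (fun y => decide (y ≤ x))
    if g = f.length then false
    else if a.length < rot + g then true
    else dAux a' (f.drop (g + 1)) 0

theorem dAux_zero (a : List Int) : ∀ f, dAux a f 0 = dScan a f := by
  induction a with
  | nil => intro f; rfl
  | cons x a' ih =>
    intro f
    rw [dAux, dScan]
    simp only [Nat.zero_add]
    split
    · rfl
    · split
      · rfl
      · exact ih _

-- on sorted inputs, badLoop is exactly the closed-form scan dAux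
theorem badLoop_eq_dAux (n : Nat) : ∀ (a f : List Int) (rot : Nat),
    a.length + f.length ≤ n → a.Pairwise (· ≤ ·) → f.Pairwise (· ≤ ·) →
    badLoop a f rot = dAux a f rot := by
  induction n with
  | zero =>
    intro a f rot hn _ _
    have ha : a = [] := by cases a <;> simp_all
    subst ha
    rw [badLoop, dAux.eq_def]
    split <;> rfl
  | succ n ih =>
    intro a f rot hn hsa hsf
    by_cases hrot : rot ≤ a.length
    · match a, f with
      | [], _ =>
        rw [badLoop, dAux.eq_def]
        simp
      | x :: a', [] =>
        rw [badLoop.eq_def, dAux.eq_def]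
        simp
      | x :: a', y :: f' =>
        rw [badLoop.eq_def]
        simp only [if_pos hrot]
        by_cases hxy : x < y
        · -- match: the count of non-beaters is 0, both sides step to (a', f')
          have hg : (y :: f').countP (fun z => decide (z ≤ x)) = 0 := by
            rw [List.countP_eq_zero]
            intro z hz
            have hyz : y ≤ z := by
              rcases List.mem_cons.1 hz with rfl | hz'
              · exact le_refl _
              · exact (List.pairwise_cons.1 hsf).1 z hz'
            simp; omega
          rw [if_pos hxy, dAux]
          simp only [hg]
          have h1 : ¬ (0 = (y :: f').length) := by simp
          have h2 : ¬ ((x :: a').length < rot + 0) := by simpa using hrot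
          rw [if_neg h1, if_neg h2]
          simp only [List.drop_succ_cons, List.drop_zero]
          rw [ih a' f' 0 (by simp at hn ⊢; omega)
            (List.Pairwise.sublist (by simp) hsa) (List.Pairwise.sublist (by simp) hsf)]
        · -- skip: y ≤ x, the count on y :: f' is one more than on f'
          have hyx : y ≤ x := by omega
          have hg : (y :: f').countP (fun z => decide (z ≤ x))
              = f'.countP (fun z => decide (z ≤ x)) + 1 := by
            simp [hyx]
          rw [if_neg hxy,
            ih (x :: a') f' (rot + 1) (by simp at hn ⊢; omega) hsa
              (List.Pairwise.sublist (by simp) hsf)]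
          rw [dAux, dAux]
          simp only [hg]
          have hlen : (f'.countP (fun z => decide (z ≤ x)) + 1 = (y :: f').length)
              ↔ (f'.countP (fun z => decide (z ≤ x)) = f'.length) := by simp
          by_cases hfull : f'.countP (fun z => decide (z ≤ x)) = f'.length
          · rw [if_pos hfull, if_pos (hlen.2 hfull)]
          · rw [if_neg hfull, if_neg (fun h => hfull (hlen.1 h))]
            have hcap : ((x :: a').length < rot + 1 + f'.countP (fun z => decide (z ≤ x)))
                ↔ ((x :: a').length < rot + (f'.countP (fun z => decide (z ≤ x)) + 1)) := by omega
            split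
            · rename_i h
              rw [if_pos (hcap.1 h)]
            · rename_i h
              rw [if_neg (fun h' => h (hcap.2 h'))]
              simp only [List.drop_succ_cons]
    · rw [badLoop.eq_def, dAux.eq_def]
      simp only [if_neg hrot]
      cases a with
      | nil => rfl
      | cons x a' =>
        simp only []
        have hlt : a'.length + 1 < rot := by simp at hrot; omega
        by_cases hfull : (f.countP (fun z => decide (z ≤ x)) = f.length)
        · rw [if_pos hfull]
          simp only [List.any_eq_false]
          rw [List.countP_eq_length] at hfull
          intro y hy
          have := hfull y hy
          simp at this ⊢
          omega
        · rw [if_neg hfull]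
          have : (x :: a').length < rot + f.countP (fun z => decide (z ≤ x)) := by
            simp; omega
          rw [if_pos this]
          simp only [List.any_eq_true]
          have : ∃ z ∈ f, ¬ (decide (z ≤ x) = true) := by
            by_contra hall
            push Not at hall
            exact hfull (List.countP_eq_length.2 (fun z hz => hall z hz))
          rcases this with ⟨z, hz, hzx⟩
          exact ⟨z, hz, by simp at hzx ⊢; omega⟩

-- reference greedy with A's rotation cap, junk elements dropped (proof helper for the A side)
def capCount (a f : List Int) (rot : Nat) : Int :=
  if rot ≤ a.length then
    match a, f with
    | [], _ => 0
    | _, [] => 0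
    | x :: a', y :: f' =>
      if x < y then 1 + capCount a' f' 0 else capCount (x :: a') f' (rot + 1)
  else 0

-- uncapped two-pointer greedy (proof helper for the B side)
def tpCount (a f : List Int) : Int :=
  match a, f with
  | [], _ => 0
  | _, [] => 0
  | x :: a', y :: f' => if x < y then 1 + tpCount a' f' else tpCount (x :: a') f'

theorem tpCount_nonneg (a f : List Int) : 0 ≤ tpCount a f := by
  induction f generalizing a with
  | nil => cases a <;> simp [tpCount]
  | cons y f' ih =>
    cases a with
    | nil => simp [tpCount]
    | cons x a' =>
      simp only [tpCount]
      split
      · have := ih a'; omega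
      · exact ih (x :: a')

theorem tpCount_pos (x : Int) (a' f : List Int) (h : ∃ y ∈ f, x < y) :
    0 < tpCount (x :: a') f := by
  induction f with
  | nil => simp at h
  | cons y f' ih =>
    simp only [tpCount]
    rcases h with ⟨z, hz, hxz⟩
    rcases List.mem_cons.1 hz with rfl | hz'
    · simp [hxz]
      have := tpCount_nonneg a' f'; omega
    · split
      · have := tpCount_nonneg a' f'; omega
      · exact ih ⟨z, hz', hxz⟩

theorem tpCount_zero (x : Int) (a' f : List Int) (h : ∀ y ∈ f, ¬ x < y) :
    tpCount (x :: a') f = 0 := by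
  induction f with
  | nil => simp [tpCount]
  | cons y f' ih =>
    simp only [tpCount]
    have hy : ¬ x < y := h y (by simp)
    simp only [if_neg hy]
    exact ih (fun z hz => h z (by simp [hz]))

-- once every remaining deque element is ≤ every remaining A element, the loop only rotates and
-- finally returns ans unchanged
theorem solLoop_junk (n : Nat) : ∀ (a g : List Int) (rot : Nat) (ans : Int),
    a.length + 1 - rot ≤ n → (∀ x ∈ g, ∀ z ∈ a, x ≤ z) → solLoop a g rot ans = ans := by
  induction n with
  | zero =>
    intro a g rot ans hn _
    rw [solLoop]
    have : ¬ rot ≤ a.length := by omega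
    simp [this]
  | succ n ih =>
    intro a g rot ans hn hjunk
    rw [solLoop]
    split
    · rename_i hrot
      match a, g with
      | [], _ => rfl
      | _ :: _, [] => rfl
      | x :: a', y :: g' =>
        have hyx : ¬ x < y := by
          have := hjunk y (by simp) x (by simp); omega
        simp only [if_neg hyx]
        exact ih (x :: a') (g' ++ [y]) (rot + 1) ans (by simp at hn ⊢; omega)
          (fun z hz w hw => hjunk z (by simp at hz; rcases hz with h | h <;> simp [h]) w hw)
    · rfl

-- the A loop on sorted a with deque f ++ g (g = already-skipped junk, each junk ≤ every
-- remaining A element) computes ans + capCount a f rot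
theorem solLoop_eq_capCount (n : Nat) : ∀ (a f g : List Int) (rot : Nat) (ans : Int),
    a.length + f.length ≤ n → a.Pairwise (· ≤ ·) → (∀ x ∈ g, ∀ z ∈ a, x ≤ z) →
    solLoop a (f ++ g) rot ans = ans + capCount a f rot := by
  induction n with
  | zero =>
    intro a f g rot ans hn hsort hjunk
    have ha : a = [] := by cases a <;> simp_all
    have hf : f = [] := by cases f <;> simp_all
    subst ha; subst hf
    rw [solLoop, capCount]
    simp
  | succ n ih =>
    intro a f g rot ans hn hsort hjunk
    by_cases hrot : rot ≤ a.length
    · match a, f with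
      | [], _ =>
        rw [solLoop, capCount]
        simp only [dif_pos hrot, if_pos hrot]
        cases f ++ g <;> simp
      | x :: a', [] =>
        rw [capCount.eq_def]
        simp only [List.nil_append, if_pos hrot]
        rw [solLoop_junk (a := x :: a') ((x :: a').length + 1) g rot ans (by omega) hjunk]
        simp
      | x :: a', y :: f' =>
        rw [solLoop.eq_def, capCount.eq_def]
        simp only [if_pos hrot, dif_pos hrot, List.cons_append]
        by_cases hxy : x < y
        · simp only [if_pos hxy]
          rw [ih a' f' g 0 (ans + 1) (by simp at hn ⊢; omega) (List.Pairwise.sublist (by simp) hsort)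
            (fun z hz w hw => hjunk z hz w (by simp [hw]))]
          ring
        · simp only [if_neg hxy]
          have : f' ++ g ++ [y] = f' ++ (g ++ [y]) := by simp
          rw [this, ih (x :: a') f' (g ++ [y]) (rot + 1) ans (by simp at hn ⊢; omega) hsort]
          intro z hz w hw
          rcases List.mem_append.1 hz with h | h
          · exact hjunk z h w hw
          · have hzy : z = y := by simpa using h
            subst hzy
            rcases List.mem_cons.1 hw with rfl | hw'
            · omega
            · have := (List.pairwise_cons.1 hsort).1 w hw'
              omega
    · rw [solLoop.eq_def, capCount.eq_def]
      simp [hrot]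

-- B's fold over sorted(B), started at index k, adds tpCount of the rest of a
theorem foldl_eq_tpCount (a : List Int) : ∀ (b : List Int) (k : Nat), k ≤ a.length →
    b.foldl (fun (i : Int) x =>
        if i < (a.length : Int) ∧ PySem.List.pyGetD a i 0 < x then i + 1 else i) (k : Int)
      = (k : Int) + tpCount (a.drop k) b := by
  intro b
  induction b with
  | nil =>
    intro k hk
    cases a.drop k <;> simp [tpCount]
  | cons y b' ih =>
    intro k hk
    simp only [List.foldl_cons]
    by_cases hklen : k < a.length
    · have hdrop : a.drop k = a[k] :: a.drop (k + 1) := List.drop_eq_getElem_cons hklen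
      have hget : PySem.List.pyGetD a (k : Int) 0 = a[k] := by
        rw [PySem.List.pyGetD_natCast]
        simp [List.getD, hklen]
      by_cases hxy : a[k] < y
      · have hcond : ((k : Int) < (a.length : Int) ∧ PySem.List.pyGetD a (k : Int) 0 < y) := by
          constructor
          · exact_mod_cast hklen
          · rw [hget]; exact hxy
        rw [if_pos hcond]
        have : ((k : Int) + 1) = ((k + 1 : Nat) : Int) := by push_cast; ring
        rw [this, ih (k + 1) (by omega), hdrop]
        simp only [tpCount, if_pos hxy]
        push_cast; ring
      · have hcond : ¬ ((k : Int) < (a.length : Int) ∧ PySem.List.pyGetD a (k : Int) 0 < y) := by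
          rw [hget]
          intro ⟨_, h2⟩; exact hxy h2
        rw [if_neg hcond, ih k hk, hdrop]
        simp only [tpCount, if_neg hxy]
    · have hke : k = a.length := by omega
      have hdrop : a.drop k = [] := by simp [hke]
      have hcond : ¬ ((k : Int) < (a.length : Int) ∧ PySem.List.pyGetD a (k : Int) 0 < y) := by
        intro ⟨h1, _⟩
        have : k < a.length := by exact_mod_cast h1
        omega
      rw [if_neg hcond, ih k hk, hdrop]
      cases b' <;> simp [tpCount]

-- capped vs uncapped greedy: equal when badLoop is false, strictly smaller when it is true
theorem capCount_vs_tpCount (n : Nat) : ∀ (a f : List Int) (rot : Nat),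
    a.length + f.length ≤ n →
    (badLoop a f rot = true → capCount a f rot < tpCount a f) ∧
    (badLoop a f rot = false → capCount a f rot = tpCount a f) := by
  induction n with
  | zero =>
    intro a f rot hn
    have ha : a = [] := by cases a <;> simp_all
    subst ha
    rw [badLoop, capCount]
    constructor <;> intro h <;> simp_all [tpCount]
  | succ n ih =>
    intro a f rot hn
    by_cases hrot : rot ≤ a.length
    · match a, f with
      | [], _ =>
        rw [badLoop.eq_def, capCount.eq_def]
        simp only [if_pos hrot]
        cases f <;> simp [tpCount]
      | x :: a', [] =>
        rw [badLoop.eq_def, capCount.eq_def]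
        simp [tpCount]
      | x :: a', y :: f' =>
        rw [badLoop.eq_def, capCount.eq_def]
        simp only [if_pos hrot]
        by_cases hxy : x < y
        · simp only [if_pos hxy, tpCount]
          have := ih a' f' 0 (by simp at hn ⊢; omega)
          constructor <;> intro h
          · have := this.1 h; omega
          · have := this.2 h; omega
        · simp only [if_neg hxy, tpCount]
          exact ih (x :: a') f' (rot + 1) (by simp at hn ⊢; omega)
    · rw [badLoop.eq_def, capCount.eq_def]
      simp only [if_neg hrot]
      match a with
      | [] => cases f <;> simp [tpCount]
      | x :: a' =>
        constructor <;> intro h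
        · simp only [List.any_eq_true] at h
          rcases h with ⟨y, hy, hxy⟩
          exact tpCount_pos x a' f ⟨y, hy, by simpa using hxy⟩
        · simp only [List.any_eq_false] at h
          exact (tpCount_zero x a' f (fun y hy => by simpa using h y hy)).symm

-- Python's sorted(xs) and Mathlib's insertionSort agree on Int lists
theorem sorted_eq_insertionSort (A : List Int) :
    PySem.List.sorted A (fun x => x) false = A.insertionSort (· ≤ ·) := by
  apply PySem.List.sorted_id_eq_of_perm_of_pairwise A (A.insertionSort (· ≤ ·))
    (List.perm_insertionSort _ A)
  exact List.sorted_insertionSort _ A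

-- both ports, rewritten through the reference greedies
theorem solution_eq_capCount (A B : List Int) :
    solution A B = capCount (PySem.List.sorted A (fun x => x) false)
      (PySem.List.sorted B (fun x => x) false) 0 := by
  unfold solution
  have h := solLoop_eq_capCount
    ((PySem.List.sorted A (fun x => x) false).length + (PySem.List.sorted B (fun x => x) false).length)
    (PySem.List.sorted A (fun x => x) false) (PySem.List.sorted B (fun x => x) false) [] 0 0
    (by omega) (PySem.List.sorted_pairwise A (fun x => x)) (by simp)
  simpa using h

theorem solution_alt_eq_tpCount (A B : List Int) :
    solution_alt A B = tpCount (PySem.List.sorted A (fun x => x) false)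
      (PySem.List.sorted B (fun x => x) false) := by
  unfold solution_alt
  have h := foldl_eq_tpCount (PySem.List.sorted A (fun x => x) false)
    (PySem.List.sorted B (fun x => x) false) 0 (by omega)
  simpa using h

-- ===== VERDICT (by name: the statement is the Claim_ definition above) =====
theorem solution_spec : Claim_unchanged_solution := by
  intro A B _ hnd
  have hbad : badLoop (PySem.List.sorted A (fun x => x) false)
      (PySem.List.sorted B (fun x => x) false) 0 = false := by
    unfold D_solution at hnd
    rw [badLoop_eq_dAux _ _ _ _ (le_refl _) (PySem.List.sorted_pairwise A (fun x => x))
      (PySem.List.sorted_pairwise B (fun x => x)), dAux_zero,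
      sorted_eq_insertionSort A, sorted_eq_insertionSort B]
    simpa using hnd
  rw [solution_eq_capCount, solution_alt_eq_tpCount]
  exact (capCount_vs_tpCount _ _ _ _ (le_refl _)).2 hbad

theorem solution_changed : Claim_changed_solution := by
  unfold Claim_changed_solution
  refine ⟨by decide, by decide, ?_, by decide, by decide⟩
  rw [solution_eq_capCount]
  decide

theorem solution_tight : Claim_exact_solution := by
  intro A B _ hd
  unfold D_solution at hd
  have hbad : badLoop (PySem.List.sorted A (fun x => x) false)
      (PySem.List.sorted B (fun x => x) false) 0 = true := by
    rw [badLoop_eq_dAux _ _ _ _ (le_refl _) (PySem.List.sorted_pairwise A (fun x => x))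
      (PySem.List.sorted_pairwise B (fun x => x)), dAux_zero,
      sorted_eq_insertionSort A, sorted_eq_insertionSort B]
    exact hd
  rw [solution_eq_capCount, solution_alt_eq_tpCount]
  exact ne_of_lt ((capCount_vs_tpCount _ _ _ _ (le_refl _)).1 hbad)
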